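-- pv_equiv track=rewrite | github.com/mribrahim/AE-FAR | utils.py | apply_adjustment
-- ===== SOURCE A (Python) =====
-- def apply_adjustment(gt_, pred_):
--     gt = gt_.copy()
--     pred = pred_.copy()
--     anomaly_state = False
--     for i in range(len(gt)):
--         if gt[i] == 1 and pred[i] == 1 and not anomaly_state:
--             anomaly_state = True
--             for j in range(i, 0, -1):
--                 if gt[j] == 0:
--                     break
--                 else:
--                     if pred[j] == 0:
--                         pred[j] = 1
--             for j in range(i, len(gt)):
--                 if gt[j] == 0:
--                     break
--                 else:
--                     if pred[j] == 0:
--                         pred[j] = 1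
--         elif gt[i] == 0:
--             anomaly_state = False
--         if anomaly_state:
--             pred[i] = 1
--     return gt, pred
-- ===== SOURCE B (Python) =====
-- def apply_adjustment(gt_, pred_):
--     gt = list(gt_)
--     pred = list(pred_)
--     n = len(gt)
--     out = []
--     i = 0
--     while i < n:
--         if gt[i] == 0:
--             out.append(pred[i])
--             i += 1
--             continue
--         j = i
--         while j < n and gt[j] != 0:
--             j += 1
--         gseg = gt[i:j]
--         pseg = pred[i:j]
--         t = next((k for k in range(len(gseg)) if gseg[k] == 1 and pseg[k] == 1), None)
--         if t is None:
--             out.extend(pseg)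
--         else:
--             out.extend(p if p != 0 else 1 for p in pseg[:t])
--             out.extend([1] * (len(gseg) - t))
--         i = j
--     out.extend(pred[n:])
--     return gt, out
-- ===== Notes on version B (the rewrite author's own statement) =====
-- stated objective: alternative
-- what changed: Replaces A's single-pass anomaly-state machine (with inline backward/forward fill loops and a per-index overwrite flag) by a two-phase pass that delimits each maximal nonzero segment of gt, finds the segment's first detection point (gt==1 and pred==1), and rebuilds the segment (0->1 before the detection, all-1 from it on).
-- intended difference: On inputs whose gt starts a nonzero segment at index 0 with pred[0]==0 and a detection point later in that first segment, A's backward fill 'range(i, 0, -1)' stops before index 0 and returns pred[0]==0, while B fills the whole segment and returns pred[0]==1, the intended point-adjustment of the anomaly segment. — e.g. on apply_adjustment([1, 1], [0, 1]): A returns ([1, 1], [0, 1]), B returns ([1, 1], [1, 1])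
-- outside the precondition, e.g. on apply_adjustment([0], []): A returns ([0], []), B raises IndexError; on apply_adjustment([0, 5], [3]): A returns ([0, 5], [3]), B returns ([0, 5], [3])
import Mathlib
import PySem

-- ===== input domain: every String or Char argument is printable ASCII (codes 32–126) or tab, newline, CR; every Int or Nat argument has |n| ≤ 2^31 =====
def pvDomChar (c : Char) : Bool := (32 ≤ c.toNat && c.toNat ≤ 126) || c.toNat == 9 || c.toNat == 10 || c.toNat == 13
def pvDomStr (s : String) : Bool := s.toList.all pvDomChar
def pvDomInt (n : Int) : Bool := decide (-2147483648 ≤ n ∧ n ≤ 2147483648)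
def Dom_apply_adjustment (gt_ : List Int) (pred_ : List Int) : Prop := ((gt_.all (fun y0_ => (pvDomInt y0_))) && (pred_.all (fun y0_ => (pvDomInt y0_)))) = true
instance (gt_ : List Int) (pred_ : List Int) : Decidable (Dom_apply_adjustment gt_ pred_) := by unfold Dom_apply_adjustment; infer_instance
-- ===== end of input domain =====

-- B replaces A's inline anomaly-state machine (with its backward/forward fill loops) by a
-- two-phase pass: delimit each maximal nonzero segment of gt, find its first detection point,
-- and emit the filled segment; objective: alternative (same O(n) cost, clearer structure).
-- Neither program mutates its inputs (A works on copies); equivalence is about the return value.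

-- ===== PORT A =====
-- inner backward loop 'for j in range(i, 0, -1)' (break on gt[j]==0; set pred[j]=1 where pred[j]==0)
def aBack (gt : List Int) : Nat → List Int → List Int
  | 0, pred => pred
  | j+1, pred =>
    if gt.getD (j+1) 0 = 0 then pred
    else aBack gt j (if pred.getD (j+1) 0 = 0 then pred.set (j+1) 1 else pred)

-- inner forward loop 'for j in range(i, len(gt))' (break on gt[j]==0; set pred[j]=1 where
-- pred[j]==0); fuel = len(gt) - j counts the remaining iterations
def aFwd (gt : List Int) : Nat → Nat → List Int → List Int
  | 0, _, pred => pred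
  | fuel+1, j, pred =>
    if gt.getD j 0 = 0 then pred
    else aFwd gt fuel (j+1) (if pred.getD j 0 = 0 then pred.set j 1 else pred)

-- outer loop 'for i in range(len(gt))' carrying (pred, anomaly_state); fuel = len(gt) - i;
-- the trailing 'if anomaly_state: pred[i] = 1' is merged into each branch's recursive call
def aLoop (gt : List Int) (n : Nat) : Nat → Nat → List Int → Bool → List Int
  | 0, _, pred, _ => pred
  | fuel+1, i, pred, st =>
    if gt.getD i 0 = 1 ∧ pred.getD i 0 = 1 ∧ st = false then
      aLoop gt n fuel (i+1) ((aFwd gt (n - i) i (aBack gt i pred)).set i 1) true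
    else if gt.getD i 0 = 0 then
      aLoop gt n fuel (i+1) pred false
    else
      aLoop gt n fuel (i+1) (if st then pred.set i 1 else pred) st

def apply_adjustment (gt_ : List Int) (pred_ : List Int) : List Int × List Int :=
  (gt_, aLoop gt_ gt_.length gt_.length 0 pred_ false)

-- ===== PORT B =====
-- 't = next((k for k in range(len(gseg)) if gseg[k]==1 and pseg[k]==1), None)'
def findTrig : List Int → List Int → Option Nat
  | g :: gs, p :: ps => if g = 1 ∧ p = 1 then some 0 else (findTrig gs ps).map (· + 1)
  | _, _ => none

-- fill one segment: keep it if no detection, else 0→1 before the first detection, all-1 from it on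
def bFill (gseg : List Int) (pseg : List Int) : List Int :=
  match findTrig gseg pseg with
  | none => pseg
  | some t => (pseg.take t).map (fun p => if p ≠ 0 then p else 1) ++ List.replicate (gseg.length - t) 1

-- the outer while loop: consume one zero of gt, or one whole maximal nonzero segment;
-- fuel = number of remaining iterations, at most the remaining length of gt
def bGo : Nat → List Int → List Int → List Int
  | _, [], pred => pred
  | 0, _ :: _, pred => pred
  | fuel+1, g :: gtt, pred =>
    if g = 0 then pred.take 1 ++ bGo fuel gtt (pred.drop 1)
    else
      bFill ((g :: gtt).takeWhile (· != 0)) (pred.take ((g :: gtt).takeWhile (· != 0)).length)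
        ++ bGo fuel ((g :: gtt).dropWhile (· != 0)) (pred.drop ((g :: gtt).takeWhile (· != 0)).length)

def apply_adjustment_alt (gt_ : List Int) (pred_ : List Int) : List Int × List Int :=
  (gt_, bGo gt_.length gt_ pred_)

-- ===== PRECONDITION & SPEC =====
-- Pre_ excludes inputs with pred_ shorter than gt_: on many of them A (and B) index past the
-- end of pred and raise IndexError, and which length-mismatched inputs still return (both
-- programs agree where both do) is an accident of how far each scan happens to read, not part
-- of the function's contract.
def Pre_apply_adjustment (gt_ : List Int) (pred_ : List Int) : Prop := gt_.length ≤ pred_.length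
instance (gt_ : List Int) (pred_ : List Int) : Decidable (Pre_apply_adjustment gt_ pred_) := by unfold Pre_apply_adjustment; infer_instance

def pvWitness_apply_adjustment : List Int × List Int := ([1, 0, 1], [1, 1, 0])

-- On inputs whose gt starts a nonzero segment at index 0 with pred_[0] == 0 and a detection
-- point (gt==1 and pred==1) later in that first segment, A's backward fill 'range(i, 0, -1)'
-- stops before index 0 and returns pred[0] == 0, while B fills the whole segment and returns
-- pred[0] == 1, which is the intended point-adjustment of the anomaly segment.
def D_apply_adjustment (gt_ : List Int) (pred_ : List Int) : Prop :=
  gt_.getD 0 0 ≠ 0 ∧ pred_.getD 0 0 = 0 ∧ pred_ ≠ [] ∧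
    ∃ t, 1 ≤ t ∧ t < gt_.length ∧ (∀ j, j ≤ t → gt_.getD j 0 ≠ 0) ∧
      gt_.getD t 0 = 1 ∧ pred_.getD t 0 = 1
instance (gt_ : List Int) (pred_ : List Int) : Decidable (D_apply_adjustment gt_ pred_) := by
  unfold D_apply_adjustment
  have : Decidable (∃ t, 1 ≤ t ∧ t < gt_.length ∧ (∀ j, j ≤ t → gt_.getD j 0 ≠ 0) ∧
      gt_.getD t 0 = 1 ∧ pred_.getD t 0 = 1) := by
    apply decidable_of_iff (∃ t < gt_.length, 1 ≤ t ∧ (∀ j, j ≤ t → gt_.getD j 0 ≠ 0) ∧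
      gt_.getD t 0 = 1 ∧ pred_.getD t 0 = 1)
    constructor
    · rintro ⟨t, h1, h2, h3⟩; exact ⟨t, h2, h1, h3⟩
    · rintro ⟨t, h1, h2, h3⟩; exact ⟨t, h2, h1, h3⟩
  infer_instance

def Spec_apply_adjustment (gt_ : List Int) (pred_ : List Int) (out : List Int × List Int) : Prop :=
  ¬ D_apply_adjustment gt_ pred_ → out = apply_adjustment_alt gt_ pred_
instance (gt_ : List Int) (pred_ : List Int) (out : List Int × List Int) : Decidable (Spec_apply_adjustment gt_ pred_ out) := by unfold Spec_apply_adjustment; infer_instance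

def pvDiffWitness_apply_adjustment : List Int × List Int := ([1, 1], [0, 1])
def pvDiffWitnessOut_apply_adjustment : (List Int × List Int) × (List Int × List Int) :=
  (([1, 1], [0, 1]), ([1, 1], [1, 1]))

-- ===== CLAIM (what is proved, stated in full; the proofs are below) =====
def Claim_unchanged_apply_adjustment : Prop := ∀ (gt_ : List Int) (pred_ : List Int), Dom_apply_adjustment gt_ pred_ → Pre_apply_adjustment gt_ pred_ → Spec_apply_adjustment gt_ pred_ (apply_adjustment gt_ pred_)
def Claim_changed_apply_adjustment : Prop := Dom_apply_adjustment (pvDiffWitness_apply_adjustment.1) (pvDiffWitness_apply_adjustment.2) ∧ Pre_apply_adjustment (pvDiffWitness_apply_adjustment.1) (pvDiffWitness_apply_adjustment.2) ∧ D_apply_adjustment (pvDiffWitness_apply_adjustment.1) (pvDiffWitness_apply_adjustment.2) ∧ apply_adjustment (pvDiffWitness_apply_adjustment.1) (pvDiffWitness_apply_adjustment.2) = pvDiffWitnessOut_apply_adjustment.1 ∧ apply_adjustment_alt (pvDiffWitness_apply_adjustment.1) (pvDiffWitness_apply_adjustment.2) = pvDiffWitnessOut_apply_adjustment.2 ∧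 pvDiffWitnessOut_apply_adjustment.1 ≠ pvDiffWitnessOut_apply_adjustment.2

def Claim_exact_apply_adjustment : Prop := ∀ (gt_ : List Int) (pred_ : List Int), Dom_apply_adjustment gt_ pred_ → Pre_apply_adjustment gt_ pred_ → D_apply_adjustment gt_ pred_ → apply_adjustment gt_ pred_ ≠ apply_adjustment_alt gt_ pred_

-- ===== LEMMAS AND PROOFS =====

-- getD/set/take/drop plumbing
lemma getD_set' (l : List Int) (i j : Nat) (v : Int) :
    (l.set i v).getD j 0 = if i = j ∧ j < l.length then v else l.getD j 0 := by
  simp only [List.getD_eq_getElem?_getD, List.getElem?_set]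
  split_ifs <;> simp_all

lemma getD_append' (a b : List Int) (m : Nat) :
    (a ++ b).getD m 0 = if m < a.length then a.getD m 0 else b.getD (m - a.length) 0 := by
  simp only [List.getD_eq_getElem?_getD, List.getElem?_append]
  split_ifs <;> simp_all

lemma getD_drop' (l : List Int) (i k : Nat) : (l.drop i).getD k 0 = l.getD (i + k) 0 := by
  simp [List.getD_eq_getElem?_getD, List.getElem?_drop]

lemma getD_take' (l : List Int) (t k : Nat) :
    (l.take t).getD k 0 = if k < t then l.getD k 0 else 0 := by
  simp only [List.getD_eq_getElem?_getD, List.getElem?_take]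
  split_ifs <;> simp_all

-- A-side: lengths are preserved
lemma aBack_length (gt : List Int) : ∀ t pred, (aBack gt t pred).length = pred.length := by
  intro t
  induction t with
  | zero => intro pred; rfl
  | succ t ih =>
    intro pred
    simp only [aBack]
    split
    · rfl
    · rw [ih]; split <;> simp

lemma aFwd_length (gt : List Int) : ∀ fuel j pred, (aFwd gt fuel j pred).length = pred.length := by
  intro fuel
  induction fuel with
  | zero => intro j pred; rfl
  | succ fuel ih =>
    intro j pred
    simp only [aFwd]
    split
    · rfl
    · rw [ih]; split <;> simp

-- A-side: pointwise characterisation of the backward fill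
lemma aBack_getD (gt : List Int) : ∀ t pred m, t < pred.length →
    (aBack gt t pred).getD m 0 =
      if 1 ≤ m ∧ m ≤ t ∧ (∀ k, m ≤ k → k ≤ t → gt.getD k 0 ≠ 0) ∧ pred.getD m 0 = 0
      then 1 else pred.getD m 0 := by
  intro t
  induction t with
  | zero =>
    intro pred m _
    simp only [aBack]
    rw [if_neg]; rintro ⟨h1, h2, -, -⟩; omega
  | succ t ih =>
    intro pred m ht
    have unf : aBack gt (t+1) pred = if gt.getD (t+1) 0 = 0 then pred
        else aBack gt t (if pred.getD (t+1) 0 = 0 then pred.set (t+1) 1 else pred) := rfl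
    by_cases hz : gt.getD (t+1) 0 = 0
    · rw [unf, if_pos hz, if_neg]
      rintro ⟨-, h2, h3, -⟩; exact h3 (t+1) (by omega) (by omega) hz
    · have hlen : (if pred.getD (t+1) 0 = 0 then pred.set (t+1) 1 else pred).length = pred.length := by
        split <;> simp
      rw [unf, if_neg hz, ih _ m (by rw [hlen]; omega)]
      have hqv : ∀ mm : Nat, (if pred.getD (t+1) 0 = 0 then pred.set (t+1) 1 else pred).getD mm 0 =
          if mm = t + 1 ∧ pred.getD (t+1) 0 = 0 then 1 else pred.getD mm 0 := by
        intro mm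
        split
        · next hp =>
          rw [getD_set']
          by_cases hmm : mm = t + 1
          · rw [if_pos ⟨hmm.symm, by omega⟩, if_pos ⟨hmm, hp⟩]
          · rw [if_neg (by rintro ⟨h, -⟩; exact hmm h.symm), if_neg (by rintro ⟨h, -⟩; exact hmm h)]
        · next hp =>
          by_cases hmm : mm = t + 1
          · rw [if_neg (by rintro ⟨-, h⟩; exact hp h)]
          · rw [if_neg (by rintro ⟨h, -⟩; exact hmm h)]
      by_cases hm : m = t + 1
      · subst hm
        rw [if_neg (by rintro ⟨-, h2, -, -⟩; omega), hqv]
        have hnz : ∀ k, t+1 ≤ k → k ≤ t+1 → gt.getD k 0 ≠ 0 := fun k h1 h2 => by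
          have hk : k = t+1 := by omega
          rw [hk]; exact hz
        by_cases hp : pred.getD (t+1) 0 = 0
        · rw [if_pos ⟨rfl, hp⟩, if_pos ⟨by omega, le_refl _, hnz, hp⟩]
        · rw [if_neg (by rintro ⟨-, h⟩; exact hp h), if_neg (by rintro ⟨-, -, -, h⟩; exact hp h)]
      · have hq_m : (if pred.getD (t+1) 0 = 0 then pred.set (t+1) 1 else pred).getD m 0
            = pred.getD m 0 := by
          rw [hqv, if_neg (by rintro ⟨h, -⟩; exact hm h)]
        rw [hq_m]
        by_cases hc : 1 ≤ m ∧ m ≤ t ∧ (∀ k, m ≤ k → k ≤ t → gt.getD k 0 ≠ 0) ∧ pred.getD m 0 = 0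
        · rw [if_pos hc, if_pos ⟨hc.1, by omega, fun k hk1 hk2 => by
            by_cases hk : k = t + 1
            · rw [hk]; exact hz
            · exact hc.2.2.1 k hk1 (by omega), hc.2.2.2⟩]
        · rw [if_neg hc, if_neg (by
            rintro ⟨h1, h2, h3, h4⟩
            exact hc ⟨h1, by omega, fun k hk1 hk2 => h3 k hk1 (by omega), h4⟩)]


-- A-side: pointwise characterisation of the forward fill
lemma aFwd_getD (gt : List Int) : ∀ fuel j pred m, j + fuel ≤ pred.length →
    (aFwd gt fuel j pred).getD m 0 =
      if j ≤ m ∧ m < j + fuel ∧ (∀ k, j ≤ k → k ≤ m → gt.getD k 0 ≠ 0) ∧ pred.getD m 0 = 0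
      then 1 else pred.getD m 0 := by
  intro fuel
  induction fuel with
  | zero =>
    intro j pred m _
    rw [show aFwd gt 0 j pred = pred from rfl, if_neg (by rintro ⟨h1, h2, -, -⟩; omega)]
  | succ fuel ih =>
    intro j pred m hlen
    have unf : aFwd gt (fuel+1) j pred = if gt.getD j 0 = 0 then pred
        else aFwd gt fuel (j+1) (if pred.getD j 0 = 0 then pred.set j 1 else pred) := rfl
    by_cases hz : gt.getD j 0 = 0
    · rw [unf, if_pos hz, if_neg]
      rintro ⟨h1, -, h3, -⟩; exact h3 j (le_refl _) h1 hz
    · have hlen' : (if pred.getD j 0 = 0 then pred.set j 1 else pred).length = pred.length := by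
        split <;> simp
      rw [unf, if_neg hz, ih (j+1) _ m (by rw [hlen']; omega)]
      have hqv : ∀ mm : Nat, (if pred.getD j 0 = 0 then pred.set j 1 else pred).getD mm 0 =
          if mm = j ∧ pred.getD j 0 = 0 then 1 else pred.getD mm 0 := by
        intro mm
        split
        · next hp =>
          rw [getD_set']
          by_cases hmm : mm = j
          · rw [if_pos ⟨hmm.symm, by omega⟩, if_pos ⟨hmm, hp⟩]
          · rw [if_neg (by rintro ⟨h, -⟩; exact hmm h.symm), if_neg (by rintro ⟨h, -⟩; exact hmm h)]
        · next hp =>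
          by_cases hmm : mm = j
          · rw [if_neg (by rintro ⟨-, h⟩; exact hp h)]
          · rw [if_neg (by rintro ⟨h, -⟩; exact hmm h)]
      by_cases hm : m = j
      · subst hm
        rw [if_neg (by rintro ⟨h1, -, -, -⟩; omega), hqv]
        have hnz : ∀ k, m ≤ k → k ≤ m → gt.getD k 0 ≠ 0 := fun k h1 h2 => by
          have hk : k = m := by omega
          rw [hk]; exact hz
        by_cases hp : pred.getD m 0 = 0
        · rw [if_pos ⟨rfl, hp⟩, if_pos ⟨le_refl _, by omega, hnz, hp⟩]
        · rw [if_neg (by rintro ⟨-, h⟩; exact hp h), if_neg (by rintro ⟨-, -, -, h⟩; exact hp h)]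
      · have hq_m : (if pred.getD j 0 = 0 then pred.set j 1 else pred).getD m 0
            = pred.getD m 0 := by
          rw [hqv, if_neg (by rintro ⟨h, -⟩; exact hm h)]
        rw [hq_m]
        by_cases hc : j+1 ≤ m ∧ m < j+1+fuel ∧ (∀ k, j+1 ≤ k → k ≤ m → gt.getD k 0 ≠ 0) ∧ pred.getD m 0 = 0
        · rw [if_pos hc, if_pos ⟨by omega, by omega, fun k hk1 hk2 => by
            by_cases hk : k = j
            · rw [hk]; exact hz
            · exact hc.2.2.1 k (by omega) hk2, hc.2.2.2⟩]
        · rw [if_neg hc, if_neg (by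
            rintro ⟨h1, h2, h3, h4⟩
            exact hc ⟨by omega, by omega, fun k hk1 hk2 => h3 k (by omega) hk2, h4⟩)]

-- the per-index 'if anomaly_state: pred[i] = 1' writes over a segment, as one function
def setOnes (pred : List Int) (i : Nat) : Nat → List Int
  | 0 => pred
  | c+1 => setOnes (pred.set i 1) (i+1) c

lemma setOnes_length : ∀ c (pred : List Int) i, (setOnes pred i c).length = pred.length := by
  intro c
  induction c with
  | zero => intro pred i; rfl
  | succ c ih => intro pred i; rw [show setOnes pred i (c+1) = setOnes (pred.set i 1) (i+1) c from rfl, ih]; simp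

lemma setOnes_getD : ∀ c (pred : List Int) i m, i + c ≤ pred.length →
    (setOnes pred i c).getD m 0 = if i ≤ m ∧ m < i + c then 1 else pred.getD m 0 := by
  intro c
  induction c with
  | zero => intro pred i m _; rw [show setOnes pred i 0 = pred from rfl, if_neg (by omega)]
  | succ c ih =>
    intro pred i m hlen
    rw [show setOnes pred i (c+1) = setOnes (pred.set i 1) (i+1) c from rfl,
      ih _ _ m (by simp; omega), getD_set']
    split_ifs <;> first | rfl | omega

-- A-side: the outer loop over a triggerless stretch of nonzero gt leaves pred untouched
lemma aLoop_noTrig (gt : List Int) (n : Nat) : ∀ c fuel i pred, c ≤ fuel →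
    (∀ k, i ≤ k → k < i + c → gt.getD k 0 ≠ 0 ∧ ¬(gt.getD k 0 = 1 ∧ pred.getD k 0 = 1)) →
    aLoop gt n fuel i pred false = aLoop gt n (fuel - c) (i + c) pred false := by
  intro c
  induction c with
  | zero => intro fuel i pred _ _; simp
  | succ c ih =>
    intro fuel i pred hcf hk
    obtain ⟨f, rfl⟩ : ∃ f, fuel = f + 1 := ⟨fuel - 1, by omega⟩
    have h0 := hk i (le_refl _) (by omega)
    have unf : aLoop gt n (f+1) i pred false =
        if gt.getD i 0 = 1 ∧ pred.getD i 0 = 1 ∧ (false : Bool) = false then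
          aLoop gt n f (i+1) ((aFwd gt (n - i) i (aBack gt i pred)).set i 1) true
        else if gt.getD i 0 = 0 then
          aLoop gt n f (i+1) pred false
        else
          aLoop gt n f (i+1) (if (false : Bool) then pred.set i 1 else pred) false := rfl
    rw [unf, if_neg (by rintro ⟨h1, h2, -⟩; exact h0.2 ⟨h1, h2⟩), if_neg h0.1]
    simp only [Bool.false_eq_true, if_false]
    rw [ih f (i+1) pred (by omega) (fun k hk1 hk2 => hk k (by omega) (by omega))]
    congr 1 <;> omega

-- A-side: the outer loop in anomaly state over nonzero gt writes 1 everywhere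
lemma aLoop_true (gt : List Int) (n : Nat) : ∀ c fuel i pred, c ≤ fuel →
    (∀ k, i ≤ k → k < i + c → gt.getD k 0 ≠ 0) →
    aLoop gt n fuel i pred true = aLoop gt n (fuel - c) (i + c) (setOnes pred i c) true := by
  intro c
  induction c with
  | zero => intro fuel i pred _ _; simp [show ∀ p : List Int, setOnes p i 0 = p from fun _ => rfl]
  | succ c ih =>
    intro fuel i pred hcf hk
    obtain ⟨f, rfl⟩ : ∃ f, fuel = f + 1 := ⟨fuel - 1, by omega⟩
    have h0 := hk i (le_refl _) (by omega)
    have unf : aLoop gt n (f+1) i pred true =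
        if gt.getD i 0 = 1 ∧ pred.getD i 0 = 1 ∧ (true : Bool) = false then
          aLoop gt n f (i+1) ((aFwd gt (n - i) i (aBack gt i pred)).set i 1) true
        else if gt.getD i 0 = 0 then
          aLoop gt n f (i+1) pred false
        else
          aLoop gt n f (i+1) (if (true : Bool) then pred.set i 1 else pred) true := rfl
    rw [unf, if_neg (by rintro ⟨-, -, h⟩; simp at h), if_neg h0]
    simp only [if_true]
    rw [ih f (i+1) (pred.set i 1) (by omega) (fun k hk1 hk2 => hk k (by omega) (by omega))]
    have : setOnes (pred.set i 1) (i+1) c = setOnes pred i (c+1) := rfl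
    rw [this]
    congr 1 <;> omega

-- B-side: findTrig none means no detection point
lemma findTrig_none : ∀ (gs ps : List Int), findTrig gs ps = none →
    ∀ k, k < gs.length → k < ps.length → ¬(gs.getD k 0 = 1 ∧ ps.getD k 0 = 1) := by
  intro gs
  induction gs with
  | nil => intro ps _ k hk _; simp at hk
  | cons g gs ih =>
    intro ps hnone k hk1 hk2
    cases ps with
    | nil => simp at hk2
    | cons p ps =>
      rw [show findTrig (g :: gs) (p :: ps) = if g = 1 ∧ p = 1 then some 0
          else (findTrig gs ps).map (· + 1) from rfl] at hnone
      split at hnone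
      · exact absurd hnone (by simp)
      · next hgp =>
        cases k with
        | zero => simpa using hgp
        | succ k =>
          have : findTrig gs ps = none := by
            cases hft : findTrig gs ps <;> simp [hft] at hnone ⊢
          exact ih ps this k (by simpa using hk1) (by simpa using hk2)

-- B-side: findTrig some t is the first detection point
lemma findTrig_some : ∀ (gs ps : List Int) t, findTrig gs ps = some t →
    t < gs.length ∧ t < ps.length ∧ gs.getD t 0 = 1 ∧ ps.getD t 0 = 1 ∧
      ∀ k, k < t → ¬(gs.getD k 0 = 1 ∧ ps.getD k 0 = 1) := by
  intro gs
  induction gs with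
  | nil => intro ps t h; simp [findTrig] at h
  | cons g gs ih =>
    intro ps t hsome
    cases ps with
    | nil => simp [findTrig] at hsome
    | cons p ps =>
      rw [show findTrig (g :: gs) (p :: ps) = if g = 1 ∧ p = 1 then some 0
          else (findTrig gs ps).map (· + 1) from rfl] at hsome
      split at hsome
      · next hgp =>
        obtain rfl : t = 0 := by simpa using hsome.symm
        exact ⟨by simp, by simp, by simpa using hgp.1, by simpa using hgp.2, by omega⟩
      · next hgp =>
        obtain ⟨t', hft, rfl⟩ : ∃ t', findTrig gs ps = some t' ∧ t = t' + 1 := by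
          cases hft : findTrig gs ps with
          | none => simp [hft] at hsome
          | some v =>
            simp only [hft, Option.map_some] at hsome
            exact ⟨v, rfl, by simpa using hsome.symm⟩
        obtain ⟨h1, h2, h3, h4, h5⟩ := ih ps t' hft
        refine ⟨by simpa using h1, by simpa using h2, by simpa using h3, by simpa using h4, ?_⟩
        intro k hk
        cases k with
        | zero => simpa using hgp
        | succ k => simpa using h5 k (by omega)

-- takeWhile (· != 0): its extent characterised by getD
lemma tw_spec (l : List Int) :
    (∀ j, j < (l.takeWhile (· != 0)).length → l.getD j 0 ≠ 0) ∧
      ((l.takeWhile (· != 0)).length < l.length → l.getD (l.takeWhile (· != 0)).length 0 = 0) := by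
  induction l with
  | nil => simp
  | cons g gs ih =>
    by_cases hg : g = 0
    · rw [show (g :: gs).takeWhile (· != 0) = [] by simp [hg]]
      exact ⟨by simp, fun _ => by simpa using hg⟩
    · rw [show (g :: gs).takeWhile (· != 0) = g :: gs.takeWhile (· != 0) by
        simp [hg]]
      constructor
      · intro j hj
        cases j with
        | zero => simpa using hg
        | succ j => exact ih.1 j (by simpa using hj)
      · intro hlt
        simpa using ih.2 (by simpa using hlt)

lemma dropWhile_eq_drop (l : List Int) :
    l.dropWhile (· != 0) = l.drop (l.takeWhile (· != 0)).length := by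
  induction l with
  | nil => simp
  | cons g gs ih =>
    by_cases hg : g = 0
    · simp [hg]
    · simp [hg, ih]

lemma bGo_cons (f : Nat) (g : Int) (gtt p : List Int) : bGo (f+1) (g :: gtt) p =
    if g = 0 then p.take 1 ++ bGo f gtt (p.drop 1)
    else bFill ((g :: gtt).takeWhile (· != 0)) (p.take ((g :: gtt).takeWhile (· != 0)).length)
      ++ bGo f ((g :: gtt).dropWhile (· != 0)) (p.drop ((g :: gtt).takeWhile (· != 0)).length) := rfl

lemma bGo_nil : ∀ (f : Nat) (p : List Int), bGo f [] p = p := by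
  intro f p; cases f <;> rfl

lemma bGo_fuel_irrel : ∀ f1 f2 (l p : List Int), l.length ≤ f1 → l.length ≤ f2 →
    bGo f1 l p = bGo f2 l p := by
  intro f1
  induction f1 with
  | zero =>
    intro f2 l p h1 _
    cases l with
    | nil => cases f2 <;> rfl
    | cons g gtt => simp at h1
  | succ f1 ih =>
    intro f2 l p h1 h2
    cases l with
    | nil => cases f2 <;> rfl
    | cons g gtt =>
      obtain ⟨f2', rfl⟩ : ∃ f2', f2 = f2' + 1 := ⟨f2 - 1, by simp at h2; omega⟩
      rw [bGo_cons, bGo_cons]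
      by_cases hg : g = 0
      · rw [if_pos hg, if_pos hg, ih f2' gtt _ (by simp at h1; omega) (by simp at h2; omega)]
      · have hd : ((g :: gtt).dropWhile (· != 0)).length ≤ gtt.length := by
          rw [show (g :: gtt).dropWhile (· != 0) = gtt.dropWhile (· != 0) by
            simp [hg]]
          exact List.length_dropWhile_le _ _
        rw [if_neg hg, if_neg hg, ih f2' _ _ (by simp at h1; omega) (by simp at h2; omega)]

lemma tw_le (l : List Int) : (l.takeWhile (· != 0)).length ≤ l.length :=
  (List.takeWhile_prefix _).length_le

lemma getD_map_ite (xs : List Int) (k : Nat) :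
    ((xs.map (fun p => if p ≠ 0 then p else 1)).getD k 0) =
      if k < xs.length then (if xs.getD k 0 ≠ 0 then xs.getD k 0 else 1) else 0 := by
  simp only [List.getD_eq_getElem?_getD, List.getElem?_map]
  by_cases h : k < xs.length
  · rw [if_pos h, List.getElem?_eq_getElem h]; simp
  · rw [if_neg h, List.getElem?_eq_none (by omega)]; simp

lemma getD_replicate' (c k : Nat) : (List.replicate c (1:Int)).getD k 0 = if k < c then 1 else 0 := by
  simp only [List.getD_eq_getElem?_getD, List.getElem?_replicate]
  split_ifs <;> simp

-- the main loop correspondence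
lemma main_lemma (gt : List Int) : ∀ fuel i pred, i + fuel = gt.length →
    gt.length ≤ pred.length →
    (0 < i → gt.getD (i-1) 0 = 0) →
    (i = 0 → ¬ D_apply_adjustment gt pred) →
    aLoop gt gt.length fuel i pred false = pred.take i ++ bGo fuel (gt.drop i) (pred.drop i) := by
  intro fuel
  induction fuel using Nat.strong_induction_on with
  | _ fuel ih =>
  intro i pred hif hlen hprev hsafe
  rcases fuel with _ | f
  · -- loop finished: i = len(gt)
    have hi : i = gt.length := by omega
    subst hi
    rw [show aLoop gt gt.length 0 gt.length pred false = pred from rfl, List.drop_length,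
      show bGo 0 [] (pred.drop gt.length) = pred.drop gt.length from rfl]
    exact (List.take_append_drop _ _).symm
  have hin : i < gt.length := by omega
  have hgetI : gt.getD i 0 = gt[i] := List.getD_eq_getElem gt 0 hin
  have hdropGt : gt.drop i = gt[i] :: gt.drop (i+1) := List.drop_eq_getElem_cons hin
  by_cases hgz : gt.getD i 0 = 0
  · -- gt[i] == 0: anomaly_state stays False, pred untouched; B copies one element
    have unf : aLoop gt gt.length (f+1) i pred false =
        if gt.getD i 0 = 1 ∧ pred.getD i 0 = 1 ∧ (false : Bool) = false then
          aLoop gt gt.length f (i+1) ((aFwd gt (gt.length - i) i (aBack gt i pred)).set i 1) true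
        else if gt.getD i 0 = 0 then
          aLoop gt gt.length f (i+1) pred false
        else
          aLoop gt gt.length f (i+1) (if (false : Bool) then pred.set i 1 else pred) false := rfl
    rw [unf, if_neg (by rintro ⟨h1, -, -⟩; rw [hgz] at h1; norm_num at h1), if_pos hgz]
    rw [ih f (by omega) (i+1) pred (by omega) hlen (fun _ => hgz) (by omega)]
    rw [hdropGt, bGo_cons, if_pos (by rw [← hgetI]; exact hgz), List.drop_drop,
      ← List.append_assoc, ← List.take_add]
  · -- gt[i] != 0: a maximal nonzero segment [i, i+L) starts here
    set L := ((gt.drop i).takeWhile (· != 0)).length with hL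
    have htws := tw_spec (gt.drop i)
    have hdlen : (gt.drop i).length = gt.length - i := by simp
    have hLle : L ≤ gt.length - i := by rw [hL, ← hdlen]; exact tw_le _
    have hLpos : 0 < L := by
      by_contra h
      have h0 : (gt.drop i).getD L 0 = 0 := htws.2 (by omega)
      rw [getD_drop'] at h0
      exact hgz (by rw [show i + L = i by omega] at h0; exact h0)
    have hseg : ∀ k, i ≤ k → k < i + L → gt.getD k 0 ≠ 0 := by
      intro k hk1 hk2
      have h := htws.1 (k - i) (by omega)
      rw [getD_drop', show i + (k - i) = k by omega] at h
      exact h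
    have hLn : i + L ≤ gt.length := by omega
    have hend : i + L < gt.length → gt.getD (i+L) 0 = 0 := by
      intro h
      have h2 := htws.2 (by omega)
      rw [getD_drop'] at h2
      exact h2
    have hTW : (gt.drop i).takeWhile (· != 0) = (gt.drop i).take L := by
      have h := List.take_left (l₁ := (gt.drop i).takeWhile (· != 0))
        (l₂ := (gt.drop i).dropWhile (· != 0))
      rw [List.takeWhile_append_dropWhile] at h
      exact h.symm
    have hgsegD : ∀ k, ((gt.drop i).takeWhile (· != 0)).getD k 0 =
        if k < L then gt.getD (i+k) 0 else 0 := by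
      intro k
      rw [hTW, getD_take']
      by_cases hk : k < L
      · rw [if_pos hk, if_pos hk, getD_drop']
      · rw [if_neg hk, if_neg hk]
    have hpseglen : ((pred.drop i).take L).length = L := by simp; omega
    have hpsegD : ∀ k, ((pred.drop i).take L).getD k 0 =
        if k < L then pred.getD (i+k) 0 else 0 := by
      intro k
      rw [getD_take']
      by_cases hk : k < L
      · rw [if_pos hk, if_pos hk, getD_drop']
      · rw [if_neg hk, if_neg hk]
    have hRHSunf : bGo (f+1) (gt.drop i) (pred.drop i) =
        bFill ((gt.drop i).takeWhile (· != 0)) ((pred.drop i).take L)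
          ++ bGo f (gt.drop (i+L)) (pred.drop (i+L)) := by
      rw [hdropGt, bGo_cons, if_neg (by rw [← hgetI]; exact hgz), ← hdropGt, ← hL,
        dropWhile_eq_drop, ← hL, List.drop_drop, List.drop_drop]
    cases hft : findTrig ((gt.drop i).takeWhile (· != 0)) ((pred.drop i).take L) with
    | none =>
      -- no detection point: A leaves the segment alone, B copies it
      have hb : bFill ((gt.drop i).takeWhile (· != 0)) ((pred.drop i).take L) =
          (pred.drop i).take L := by
        unfold bFill
        rw [hft]
      have hnt : ∀ k, i ≤ k → k < i + L → ¬(gt.getD k 0 = 1 ∧ pred.getD k 0 = 1) := by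
        intro k hk1 hk2 hc
        refine findTrig_none _ _ hft (k - i) (by rw [← hL]; omega) (by rw [hpseglen]; omega) ?_
        constructor
        · rw [hgsegD, if_pos (by omega), show i + (k - i) = k by omega]; exact hc.1
        · rw [hpsegD, if_pos (by omega), show i + (k - i) = k by omega]; exact hc.2
      rw [aLoop_noTrig gt gt.length L (f+1) i pred (by omega)
        (fun k hk1 hk2 => ⟨hseg k hk1 hk2, hnt k hk1 hk2⟩)]
      rw [hRHSunf, hb]
      by_cases he : i + L = gt.length
      · rw [show f + 1 - L = 0 from by omega,
          show aLoop gt gt.length 0 (i+L) pred false = pred from rfl, he, List.drop_length,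
          bGo_nil f (pred.drop gt.length),
          ← List.append_assoc, ← List.take_add, he, List.take_append_drop]
      · have hgze : gt.getD (i+L) 0 = 0 := hend (by omega)
        obtain ⟨f', hf'⟩ : ∃ f', f + 1 - L = f' + 1 := ⟨f - L, by omega⟩
        rw [hf']
        have unf2 : aLoop gt gt.length (f'+1) (i+L) pred false =
            if gt.getD (i+L) 0 = 1 ∧ pred.getD (i+L) 0 = 1 ∧ (false : Bool) = false then
              aLoop gt gt.length f' (i+L+1)
                ((aFwd gt (gt.length - (i+L)) (i+L) (aBack gt (i+L) pred)).set (i+L) 1) true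
            else if gt.getD (i+L) 0 = 0 then
              aLoop gt gt.length f' (i+L+1) pred false
            else
              aLoop gt gt.length f' (i+L+1) (if (false : Bool) then pred.set (i+L) 1 else pred) false := rfl
        rw [unf2, if_neg (by rintro ⟨h1, -, -⟩; rw [hgze] at h1; norm_num at h1), if_pos hgze]
        rw [ih f' (by omega) (i+L+1) pred (by omega) hlen
          (fun _ => by rw [show i+L+1-1 = i+L from rfl]; exact hgze) (by omega)]
        rw [bGo_fuel_irrel f (f'+1) (gt.drop (i+L)) (pred.drop (i+L)) (by simp; omega) (by simp; omega)]
        have hdropE : gt.drop (i+L) = gt[i+L] :: gt.drop (i+L+1) :=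
          List.drop_eq_getElem_cons (by omega)
        rw [hdropE, bGo_cons,
          if_pos (by rw [← List.getD_eq_getElem gt 0 (by omega)]; exact hgze), List.drop_drop,
          show i+L+1 = (i+L)+1 from rfl, List.take_add, List.take_add]
        simp [List.append_assoc]
    | some t' =>
      -- first detection at offset t': A back/forward fills, B rebuilds the segment
      obtain ⟨ht1, ht2, hgt1, hpt1, hfirst⟩ := findTrig_some _ _ _ hft
      rw [← hL] at ht1
      rw [hpseglen] at ht2
      have hgt : gt.getD (i+t') 0 = 1 := by
        rw [hgsegD, if_pos ht1] at hgt1; exact hgt1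
      have hpt : pred.getD (i+t') 0 = 1 := by
        rw [hpsegD, if_pos ht2] at hpt1; exact hpt1
      have hfirstT : ∀ k, i ≤ k → k < i + t' → ¬(gt.getD k 0 = 1 ∧ pred.getD k 0 = 1) := by
        intro k hk1 hk2 hc
        refine hfirst (k - i) (by omega) ?_
        constructor
        · rw [hgsegD, if_pos (by omega), show i + (k - i) = k by omega]; exact hc.1
        · rw [hpsegD, if_pos (by omega), show i + (k - i) = k by omega]; exact hc.2
      rw [aLoop_noTrig gt gt.length t' (f+1) i pred (by omega)
        (fun k hk1 hk2 => ⟨hseg k hk1 (by omega), hfirstT k hk1 hk2⟩)]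
      obtain ⟨f2, hf2⟩ : ∃ f2, f + 1 - t' = f2 + 1 := ⟨f - t', by omega⟩
      rw [hf2]
      have unf3 : aLoop gt gt.length (f2+1) (i+t') pred false =
          if gt.getD (i+t') 0 = 1 ∧ pred.getD (i+t') 0 = 1 ∧ (false : Bool) = false then
            aLoop gt gt.length f2 (i+t'+1)
              ((aFwd gt (gt.length - (i+t')) (i+t') (aBack gt (i+t') pred)).set (i+t') 1) true
          else if gt.getD (i+t') 0 = 0 then
            aLoop gt gt.length f2 (i+t'+1) pred false
          else
            aLoop gt gt.length f2 (i+t'+1) (if (false : Bool) then pred.set (i+t') 1 else pred) false := rfl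
      rw [unf3, if_pos ⟨hgt, hpt, rfl⟩]
      set Q := (aFwd gt (gt.length - (i+t')) (i+t') (aBack gt (i+t') pred)).set (i+t') 1 with hQ
      have hQlen : Q.length = pred.length := by
        rw [hQ, List.length_set, aFwd_length, aBack_length]
      rw [aLoop_true gt gt.length (L - t' - 1) f2 (i+t'+1) Q (by omega)
        (fun k hk1 hk2 => hseg k (by omega) (by omega))]
      rw [show i+t'+1 + (L - t' - 1) = i + L from by omega]
      set R := setOnes Q (i+t'+1) (L - t' - 1) with hR
      have hRlen : R.length = pred.length := by rw [hR, setOnes_length, hQlen]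
      have hbFillLen : (bFill ((gt.drop i).takeWhile (· != 0)) ((pred.drop i).take L)).length = L := by
        unfold bFill
        rw [hft]
        simp [← hL]
        omega
      have hQgetD : ∀ m, Q.getD m 0 =
          if i+t' = m ∧ m < pred.length then 1
          else if i+t' ≤ m ∧ m < gt.length ∧ (∀ k, i+t' ≤ k → k ≤ m → gt.getD k 0 ≠ 0) ∧
              (aBack gt (i+t') pred).getD m 0 = 0 then 1
          else (aBack gt (i+t') pred).getD m 0 := by
        intro m
        rw [hQ, getD_set', aFwd_length, aBack_length,
          aFwd_getD gt (gt.length - (i+t')) (i+t') _ m (by rw [aBack_length]; omega),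
          show i+t' + (gt.length - (i+t')) = gt.length from by omega]
      have hRkey : R = pred.take i ++ bFill ((gt.drop i).takeWhile (· != 0)) ((pred.drop i).take L)
          ++ pred.drop (i+L) := by
        apply List.ext_getElem
        · rw [hRlen]
          simp [hbFillLen]
          omega
        · intro m hm1 hm2
          rw [← List.getD_eq_getElem _ 0 hm1, ← List.getD_eq_getElem _ 0 hm2]
          rw [hR, setOnes_getD (L - t' - 1) Q (i+t'+1) m (by rw [hQlen]; omega), hQgetD,
            aBack_getD gt (i+t') pred m (by omega)]
          have hTi : (pred.take i).length = i := by rw [List.length_take]; omega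
          rw [getD_append', getD_append', List.length_append, hTi, hbFillLen]
          have hbfD : ∀ k, (bFill ((gt.drop i).takeWhile (· != 0)) ((pred.drop i).take L)).getD k 0 =
              if k < t' then (if pred.getD (i+k) 0 ≠ 0 then pred.getD (i+k) 0 else 1)
              else if k < L then 1 else 0 := by
            intro k
            have hbf : bFill ((gt.drop i).takeWhile (· != 0)) ((pred.drop i).take L) =
                (((pred.drop i).take L).take t').map (fun p => if p ≠ 0 then p else 1)
                  ++ List.replicate (L - t') 1 := by
              unfold bFill
              rw [hft, ← hL]
            rw [hbf, getD_append', getD_map_ite, List.length_map, List.length_take, hpseglen,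
              getD_replicate', getD_take', hpsegD]
            split_ifs <;> first | rfl | omega
          rw [hbfD]
          have hmlen : m < pred.length := by rw [← hRlen]; exact hm1
          by_cases hmi : m < i
          · -- below the segment: untouched (the backward fill stops at gt[i-1] == 0)
            rw [if_neg (by omega), if_neg (by omega),
              if_neg (by rintro ⟨h1, -, -, -⟩; omega),
              if_neg (by
                rintro ⟨h1, h2, h3, -⟩
                exact h3 (i-1) (by omega) (by omega) (hprev (by omega)))]
            conv_rhs => rw [if_pos (by omega), if_pos hmi, getD_take', if_pos (by omega)]
          · by_cases hmt : m < i + t'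
            · -- between segment start and detection point: 0 → 1, other values kept
              rw [if_neg (by omega), if_neg (by omega), if_neg (by rintro ⟨h1, -, -, -⟩; omega)]
              conv_rhs => rw [if_pos (by omega), if_neg hmi, if_pos (by omega)]
              rw [show i + (m - i) = m from by omega]
              by_cases hm0 : m = 0
              · -- index 0 of a first segment: A's backward loop never reaches it; ¬D_ gives pred[0] ≠ 0
                subst hm0
                have hi0 : i = 0 := by omega
                have hp0 : pred.getD 0 0 ≠ 0 := by
                  intro hp0
                  refine hsafe hi0 ⟨by rw [hi0] at hgz; exact hgz, hp0,
                    List.ne_nil_of_length_pos (by omega), t', by omega, by omega,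
                    fun j hj => hseg j (by omega) (by omega), by rw [hi0] at hgt; simpa using hgt,
                    by rw [hi0] at hpt; simpa using hpt⟩
                rw [if_neg (by rintro ⟨h1, -, -, -⟩; omega), if_pos hp0]
              · have hcondB : (1 ≤ m ∧ m ≤ i+t' ∧ (∀ k, m ≤ k → k ≤ i+t' → gt.getD k 0 ≠ 0)
                    ∧ pred.getD m 0 = 0) ↔ pred.getD m 0 = 0 := by
                  constructor
                  · rintro ⟨-, -, -, h⟩; exact h
                  · intro h
                    exact ⟨by omega, by omega, fun k hk1 hk2 => hseg k (by omega) (by omega), h⟩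
                by_cases hp : pred.getD m 0 = 0
                · rw [if_pos (hcondB.2 hp), if_neg (by rw [hp]; simp)]
                · rw [if_neg (fun h => hp (hcondB.1 h)), if_pos hp]
            · by_cases hme : m < i + L
              · -- from the detection point to the segment end: all 1
                by_cases hmT : m = i + t'
                · rw [if_neg (by omega), if_pos ⟨hmT.symm, hmlen⟩]
                  conv_rhs => rw [if_pos (by omega), if_neg hmi, if_neg (by omega), if_pos (by omega)]
                · rw [if_pos (by omega)]
                  conv_rhs => rw [if_pos (by omega), if_neg hmi, if_neg (by omega), if_pos (by omega)]
              · -- past the segment: untouched (the forward fill stops at gt[i+L] == 0)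
                rw [if_neg (by omega), if_neg (by omega)]
                rw [if_neg (by
                  rintro ⟨h1, h2, h3, -⟩
                  by_cases hel : i + L < gt.length
                  · exact h3 (i+L) (by omega) (by omega) (hend hel)
                  · omega)]
                rw [if_neg (by rintro ⟨-, h2, -, -⟩; omega)]
                conv_rhs => rw [if_neg (by omega)]
                rw [getD_drop', show i + L + (m - (i + L)) = m from by omega]
      -- assemble the final result from hRkey
      have hPreLen : (pred.take i ++ bFill ((gt.drop i).takeWhile (· != 0))
          ((pred.drop i).take L)).length = i + L := by
        rw [List.length_append, List.length_take, hbFillLen]; omega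
      by_cases he : i + L = gt.length
      · rw [show f2 - (L - t' - 1) = 0 from by omega,
          show aLoop gt gt.length 0 (i+L) R true = R from rfl, hRkey, hRHSunf]
        rw [he, List.drop_length, bGo_nil f (pred.drop gt.length), List.append_assoc]
      · have hgze : gt.getD (i+L) 0 = 0 := hend (by omega)
        obtain ⟨f3, hf3⟩ : ∃ f3, f2 - (L - t' - 1) = f3 + 1 := ⟨gt.length - (i+L) - 1, by omega⟩
        rw [hf3]
        have unf4 : aLoop gt gt.length (f3+1) (i+L) R true =
            if gt.getD (i+L) 0 = 1 ∧ R.getD (i+L) 0 = 1 ∧ (true : Bool) = false then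
              aLoop gt gt.length f3 (i+L+1)
                ((aFwd gt (gt.length - (i+L)) (i+L) (aBack gt (i+L) R)).set (i+L) 1) true
            else if gt.getD (i+L) 0 = 0 then
              aLoop gt gt.length f3 (i+L+1) R false
            else
              aLoop gt gt.length f3 (i+L+1) (if (true : Bool) then R.set (i+L) 1 else R) true := rfl
        rw [unf4, if_neg (by rintro ⟨-, -, h⟩; exact absurd h (by simp)), if_pos hgze]
        rw [ih f3 (by omega) (i+L+1) R (by omega) (by rw [hRlen]; exact hlen)
          (fun _ => hgze) (by omega)]
        have hRtake : R.take (i+L+1) = pred.take i ++ bFill ((gt.drop i).takeWhile (· != 0))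
            ((pred.drop i).take L) ++ (pred.drop (i+L)).take 1 := by
          rw [hRkey, show i+L+1 = (pred.take i ++ bFill ((gt.drop i).takeWhile (· != 0))
            ((pred.drop i).take L)).length + 1 from by rw [hPreLen],
            List.take_length_add_append]
        have hRdrop : R.drop (i+L+1) = pred.drop (i+L+1) := by
          rw [hRkey, show i+L+1 = (pred.take i ++ bFill ((gt.drop i).takeWhile (· != 0))
            ((pred.drop i).take L)).length + 1 from by rw [hPreLen],
            List.drop_length_add_append, List.drop_drop, hPreLen]
        rw [hRtake, hRdrop, hRHSunf]
        rw [bGo_fuel_irrel f (f3+1) (gt.drop (i+L)) (pred.drop (i+L)) (by simp; omega)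
          (by simp; omega)]
        have hdropE : gt.drop (i+L) = gt[i+L] :: gt.drop (i+L+1) :=
          List.drop_eq_getElem_cons (by omega)
        rw [hdropE, bGo_cons,
          if_pos (by rw [← List.getD_eq_getElem gt 0 (by omega)]; exact hgze), List.drop_drop]
        simp [List.append_assoc]

lemma aLoop_succ (gt : List Int) (n fuel i : Nat) (pred : List Int) (st : Bool) :
    aLoop gt n (fuel+1) i pred st =
      if gt.getD i 0 = 1 ∧ pred.getD i 0 = 1 ∧ st = false then
        aLoop gt n fuel (i+1) ((aFwd gt (n - i) i (aBack gt i pred)).set i 1) true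
      else if gt.getD i 0 = 0 then aLoop gt n fuel (i+1) pred false
      else aLoop gt n fuel (i+1) (if st then pred.set i 1 else pred) st := rfl

-- A's backward fill (aBack) and the writes of the outer loop past index 1 never touch index 0
lemma aBack_getD_zero (gt : List Int) : ∀ t pred, (aBack gt t pred).getD 0 0 = pred.getD 0 0 := by
  intro t
  induction t with
  | zero => intro pred; rfl
  | succ t ih =>
    intro pred
    show (if gt.getD (t+1) 0 = 0 then pred
        else aBack gt t (if pred.getD (t+1) 0 = 0 then pred.set (t+1) 1 else pred)).getD 0 0 = _
    split
    · rfl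
    · rw [ih]
      split
      · rw [getD_set', if_neg (by omega)]
      · rfl

lemma aFwd_getD_zero (gt : List Int) : ∀ fuel j pred, 1 ≤ j →
    (aFwd gt fuel j pred).getD 0 0 = pred.getD 0 0 := by
  intro fuel
  induction fuel with
  | zero => intro j pred _; rfl
  | succ fuel ih =>
    intro j pred hj
    show (if gt.getD j 0 = 0 then pred
        else aFwd gt fuel (j+1) (if pred.getD j 0 = 0 then pred.set j 1 else pred)).getD 0 0 = _
    split
    · rfl
    · rw [ih _ _ (by omega)]
      split
      · rw [getD_set', if_neg (by omega)]
      · rfl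

lemma aLoop_getD_zero (gt : List Int) (n : Nat) : ∀ fuel i pred st, 1 ≤ i →
    (aLoop gt n fuel i pred st).getD 0 0 = pred.getD 0 0 := by
  intro fuel
  induction fuel with
  | zero => intro i pred st _; rfl
  | succ fuel ih =>
    intro i pred st hi
    show (if gt.getD i 0 = 1 ∧ pred.getD i 0 = 1 ∧ st = false then
        aLoop gt n fuel (i+1) ((aFwd gt (n - i) i (aBack gt i pred)).set i 1) true
      else if gt.getD i 0 = 0 then aLoop gt n fuel (i+1) pred false
      else aLoop gt n fuel (i+1) (if st then pred.set i 1 else pred) st).getD 0 0 = _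
    split_ifs with h1 h2 h3
    · rw [ih _ _ _ (by omega), getD_set', if_neg (by omega), aFwd_getD_zero _ _ _ _ (by omega),
        aBack_getD_zero]
    · rw [ih _ _ _ (by omega)]
    · rw [ih _ _ _ (by omega), getD_set', if_neg (by omega)]
    · rw [ih _ _ _ (by omega)]

-- ===== VERDICT (by name: the statement is the Claim_ definition above) =====
theorem apply_adjustment_spec : Claim_unchanged_apply_adjustment := by
  intro gt_ pred_ _ hpre hnd
  have := main_lemma gt_ gt_.length 0 pred_ (by omega) hpre (by omega) (fun _ => hnd)
  simpa [apply_adjustment, apply_adjustment_alt, Spec_apply_adjustment] using this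

theorem apply_adjustment_changed : Claim_changed_apply_adjustment := by
  unfold Claim_changed_apply_adjustment; decide

theorem apply_adjustment_tight : Claim_exact_apply_adjustment := by
  unfold Claim_exact_apply_adjustment
  intro gt_ pred_ _ hpre hd heq
  obtain ⟨hg0, hp0, hpne, t, ht1, ht2, htall, hgt, hpt⟩ := hd
  have hA : (apply_adjustment gt_ pred_).2.getD 0 0 = 0 := by
    show (aLoop gt_ gt_.length gt_.length 0 pred_ false).getD 0 0 = 0
    obtain ⟨f, hf⟩ : ∃ f, gt_.length = f + 1 := ⟨gt_.length - 1, by omega⟩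
    rw [hf, aLoop_succ, if_neg (by rintro ⟨-, h, -⟩; rw [hp0] at h; norm_num at h), if_neg hg0]
    simp only [Bool.false_eq_true, if_false]
    rw [aLoop_getD_zero gt_ (f+1) f 1 pred_ false (le_refl 1), hp0]
  have hB : (apply_adjustment_alt gt_ pred_).2.getD 0 0 = 1 := by
    show (bGo gt_.length gt_ pred_).getD 0 0 = 1
    rcases gt_ with - | ⟨g, gtt⟩
    · simp at hg0
    have hgne : g ≠ 0 := by simpa using hg0
    set L := ((g :: gtt).takeWhile (· != 0)).length with hL
    have htws := tw_spec (g :: gtt)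
    have hLle : L ≤ (g :: gtt).length := tw_le _
    have hLbig : t < L := by
      by_contra h
      exact htall L (by omega) (htws.2 (by omega))
    have hTW : (g :: gtt).takeWhile (· != 0) = (g :: gtt).take L := by
      have h := List.take_left (l₁ := (g :: gtt).takeWhile (· != 0))
        (l₂ := (g :: gtt).dropWhile (· != 0))
      rw [List.takeWhile_append_dropWhile] at h
      exact h.symm
    have hplen : (g :: gtt).length ≤ pred_.length := hpre
    simp only [List.length_cons] at hplen
    have hLle' : L ≤ gtt.length + 1 := by simpa using hLle
    cases hft : findTrig ((g :: gtt).takeWhile (· != 0)) (pred_.take L) with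
    | none =>
      exfalso
      refine findTrig_none _ _ hft t (by rw [← hL]; omega)
        (by rw [List.length_take]; omega) ⟨?_, ?_⟩
      · rw [hTW, getD_take', if_pos hLbig]; exact hgt
      · rw [getD_take', if_pos hLbig]; exact hpt
    | some t0 =>
      obtain ⟨h1, h2, h3, h4, h5⟩ := findTrig_some _ _ _ hft
      rw [← hL] at h1
      have ht0pos : 1 ≤ t0 := by
        by_contra h
        have ht00 : t0 = 0 := by omega
        rw [ht00, getD_take', if_pos (by omega)] at h4
        rw [hp0] at h4
        norm_num at h4
      have hbf : bFill ((g :: gtt).takeWhile (· != 0)) (pred_.take L) =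
          ((pred_.take L).take t0).map (fun p => if p ≠ 0 then p else 1)
            ++ List.replicate (L - t0) 1 := by
        unfold bFill
        rw [hft, ← hL]
      have hpos3 : 0 < ((pred_.take L).take t0).length := by
        simp only [List.length_take]; omega
      have hpos2 : 0 < (((pred_.take L).take t0).map (fun p => if p ≠ 0 then p else 1)).length := by
        simpa only [List.length_map] using hpos3
      have hpos1 : 0 < (bFill ((g :: gtt).takeWhile (· != 0)) (pred_.take L)).length := by
        rw [hbf]
        simp only [List.length_append, List.length_map, List.length_take, List.length_replicate]
        omega
      rw [show (g :: gtt).length = gtt.length + 1 from rfl, bGo_cons, if_neg hgne, ← hL]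
      have hval : ((pred_.take L).take t0).getD 0 0 = 0 := by
        rw [getD_take', if_pos (by omega), getD_take', if_pos (by omega), hp0]
      rw [getD_append', if_pos hpos1, hbf, getD_append', if_pos hpos2, getD_map_ite,
        if_pos hpos3, hval]
      norm_num
  rw [heq, hB] at hA
  norm_num at hA
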